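-- pv_equiv track=rewrite | github.com/VivaLaVidad/project-claw | mock_merchants/multi_merchant_simulator.py | match_item
-- ===== SOURCE A (Python) =====
-- from typing import Optional
--
-- def match_item(menu: dict, item_name: str, demand_text: str) -> Optional[tuple]:
--     """关键词匹配，返回 (name, info) 或 None"""
--     # 精确匹配
--     for name, info in menu.items():
--         if item_name in name or name in item_name:
--             return name, info
--     # 需求文本匹配
--     for name, info in menu.items():
--         if name in demand_text:
--             return name, info
--     return None
-- ===== SOURCE B (Python) =====
-- def match_item(menu: dict, item_name: str, demand_text: str):
--     """Single scan: return an item-name match immediately, remember the first demand-text match as a fallback."""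
--     fallback = None
--     for name, info in menu.items():
--         if item_name in name or name in item_name:
--             return name, info
--         if fallback is None and name in demand_text:
--             fallback = (name, info)
--     return fallback
-- ===== Notes on version B (the rewrite author's own statement) =====
-- stated objective: simpler
-- what changed: Collapses A's two prioritized passes over the menu into a single scan that returns an item-name match immediately and keeps the first demand-text match in a fallback accumulator returned after the loop.
import Mathlib
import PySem

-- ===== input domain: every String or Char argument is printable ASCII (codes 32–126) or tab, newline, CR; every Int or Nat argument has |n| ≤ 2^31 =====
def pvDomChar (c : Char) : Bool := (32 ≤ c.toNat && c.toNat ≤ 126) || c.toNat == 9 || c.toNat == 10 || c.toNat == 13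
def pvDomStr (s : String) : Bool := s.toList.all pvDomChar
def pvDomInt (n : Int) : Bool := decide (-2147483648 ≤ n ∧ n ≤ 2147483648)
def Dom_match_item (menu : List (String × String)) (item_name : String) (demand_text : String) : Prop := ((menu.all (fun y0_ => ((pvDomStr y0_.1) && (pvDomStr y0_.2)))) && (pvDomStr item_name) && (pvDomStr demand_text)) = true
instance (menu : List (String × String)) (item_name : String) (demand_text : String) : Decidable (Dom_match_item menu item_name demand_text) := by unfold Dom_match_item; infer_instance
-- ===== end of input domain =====

-- B collapses A's two prioritized passes into a single scan with a fallback accumulator (objective: simpler).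


-- ===== PORT A =====
-- first pass: exact (item-name) match
def pyPass1 (menu : List (String × String)) (item_name : String) : Option (String × String) :=
  match menu with
  | [] => none
  | (name, info) :: rest =>
    if PySem.Str.isIn item_name name || PySem.Str.isIn name item_name then some (name, info)
    else pyPass1 rest item_name

-- second pass: demand-text match
def pyPass2 (menu : List (String × String)) (demand_text : String) : Option (String × String) :=
  match menu with
  | [] => none
  | (name, info) :: rest =>
    if PySem.Str.isIn name demand_text then some (name, info)
    else pyPass2 rest demand_text

def match_item (menu : List (String × String)) (item_name : String) (demand_text : String) : Option (String × String) :=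
  match pyPass1 menu item_name with
  | some r => some r
  | none =>
    match pyPass2 menu demand_text with
    | some r => some r
    | none => none

-- ===== PORT B =====
-- single scan with a fallback accumulator
def altScan (menu : List (String × String)) (item_name : String) (demand_text : String)
    (fallback : Option (String × String)) : Option (String × String) :=
  match menu with
  | [] => fallback
  | (name, info) :: rest =>
    if PySem.Str.isIn item_name name || PySem.Str.isIn name item_name then some (name, info)
    else
      altScan rest item_name demand_text
        (if fallback.isNone && PySem.Str.isIn name demand_text then some (name, info) else fallback)

def match_item_alt (menu : List (String × String)) (item_name : String) (demand_text : String) : Option (String × String) :=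
  altScan menu item_name demand_text none

-- ===== PRECONDITION & SPEC =====
def Spec_match_item (menu : List (String × String)) (item_name : String) (demand_text : String) (out : Option (String × String)) : Prop := out = match_item_alt menu item_name demand_text
instance (menu : List (String × String)) (item_name : String) (demand_text : String) (out : Option (String × String)) : Decidable (Spec_match_item menu item_name demand_text out) := by unfold Spec_match_item; infer_instance

-- ===== CLAIM (what is proved, stated in full; the proofs are below) =====
def Claim_equal_match_item : Prop := ∀ (menu : List (String × String)) (item_name : String) (demand_text : String), Dom_match_item menu item_name demand_text → Spec_match_item menu item_name demand_text (match_item menu item_name demand_text)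

-- ===== LEMMAS AND PROOFS =====
-- loop invariant: the single scan equals "first pass, else fallback, else second pass"
theorem altScan_eq (menu : List (String × String)) (item_name demand_text : String)
    (fb : Option (String × String)) :
    altScan menu item_name demand_text fb =
      match pyPass1 menu item_name with
      | some r => some r
      | none => match fb with
        | some f => some f
        | none => pyPass2 menu demand_text := by
  induction menu generalizing fb with
  | nil => cases fb <;> simp [altScan, pyPass1, pyPass2]
  | cons hd tl ih =>
    obtain ⟨name, info⟩ := hd
    simp only [altScan, pyPass1, pyPass2]
    cases fb <;> split_ifs <;> simp_all [ih]

-- ===== VERDICT (by name: the statement is the Claim_ definition above) =====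
theorem match_item_spec : Claim_equal_match_item := by
  intro menu item_name demand_text _
  unfold Spec_match_item match_item match_item_alt
  rw [altScan_eq]
  cases pyPass1 menu item_name <;> cases pyPass2 menu demand_text <;> rfl
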